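-- pv_equiv track=rewrite | github.com/alexSysBio/Time_lapse_on_agarose_pad | lineage_tracking.py | link_lineages
-- ===== SOURCE A (Python) =====
-- def link_lineages(cell_id_list, all_cells_list, linkage_dictionary):
--    if cell_id_list[-1] in linkage_dictionary:
--
--       linked_index = linkage_dictionary[cell_id_list[-1]]
--       cell_id_list.append(linked_index)
--       all_cells_list.append(linked_index)
--       return link_lineages(cell_id_list, all_cells_list, linkage_dictionary)
--    else:
--       return cell_id_list, all_cells_list
-- ===== SOURCE B (Python) =====
-- def link_lineages(cell_id_list, all_cells_list, linkage_dictionary):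
--     # Iterative version: chase the linkage chain once, collecting it into a
--     # tail list, then extend both lists in place with that tail.
--     tail = []
--     cur = cell_id_list[-1]
--     while cur in linkage_dictionary:
--         cur = linkage_dictionary[cur]
--         tail.append(cur)
--     cell_id_list.extend(tail)
--     all_cells_list.extend(tail)
--     return cell_id_list, all_cells_list
-- ===== Notes on version B (the rewrite author's own statement) =====
-- stated objective: simpler
-- what changed: Replaces the tail recursion (which rebuilds the call each step and re-reads cell_id_list[-1]) with a plain while loop that tracks the current id in a variable, collects the chain into one tail list and extends both lists once; avoids Python recursion depth limits.
import Mathlib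
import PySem

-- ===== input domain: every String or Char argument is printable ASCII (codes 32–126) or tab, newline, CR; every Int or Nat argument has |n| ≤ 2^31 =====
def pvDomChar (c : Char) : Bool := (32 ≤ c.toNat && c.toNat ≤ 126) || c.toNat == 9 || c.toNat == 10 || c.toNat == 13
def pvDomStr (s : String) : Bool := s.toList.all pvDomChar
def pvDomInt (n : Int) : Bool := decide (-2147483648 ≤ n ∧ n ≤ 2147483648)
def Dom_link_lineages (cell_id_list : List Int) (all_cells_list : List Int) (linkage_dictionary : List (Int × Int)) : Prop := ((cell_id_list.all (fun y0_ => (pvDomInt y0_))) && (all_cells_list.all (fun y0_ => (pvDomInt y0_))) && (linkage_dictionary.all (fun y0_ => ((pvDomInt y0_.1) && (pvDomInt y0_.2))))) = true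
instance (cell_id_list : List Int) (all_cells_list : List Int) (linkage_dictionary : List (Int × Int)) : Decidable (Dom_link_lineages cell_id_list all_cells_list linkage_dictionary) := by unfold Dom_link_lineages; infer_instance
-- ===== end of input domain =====

-- B replaces A's tail recursion by one loop collecting the chain into a tail list,
-- then extends both lists once (same in-place mutation as A; equal return value).

-- ===== PORT A =====
-- A's tail recursion over (cell_id_list, all_cells_list); the fuel argument only
-- makes the recursion total: under Pre_ the chain ends within linkage_dictionary.length
-- successful lookups, so fuel = length + 1 is never exhausted on admitted inputs.
def link_lineages_rec (fuel : Nat) (cell_id_list : List Int) (all_cells_list : List Int)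
    (linkage_dictionary : List (Int × Int)) : List Int × List Int :=
  match fuel with
  | 0 => (cell_id_list, all_cells_list)
  | fuel + 1 =>
    match PySem.List.pyGet? cell_id_list (-1) with
    | none => (cell_id_list, all_cells_list)   -- IndexError in Python; excluded by Pre_
    | some last =>
      match (PySem.Dict.mk linkage_dictionary).get? last with
      | some linked_index =>
          link_lineages_rec fuel (cell_id_list ++ [linked_index])
            (all_cells_list ++ [linked_index]) linkage_dictionary
      | none => (cell_id_list, all_cells_list)

def link_lineages (cell_id_list : List Int) (all_cells_list : List Int)
    (linkage_dictionary : List (Int × Int)) : List Int × List Int :=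
  link_lineages_rec (linkage_dictionary.length + 1) cell_id_list all_cells_list linkage_dictionary

-- ===== PORT B =====
-- B's while loop: chase the chain from the current id, collecting the tail.
def link_chase (fuel : Nat) (cur : Int) (linkage_dictionary : List (Int × Int)) : List Int :=
  match fuel with
  | 0 => []
  | fuel + 1 =>
    match (PySem.Dict.mk linkage_dictionary).get? cur with
    | some v => v :: link_chase fuel v linkage_dictionary
    | none => []

def link_lineages_alt (cell_id_list : List Int) (all_cells_list : List Int)
    (linkage_dictionary : List (Int × Int)) : List Int × List Int :=
  match PySem.List.pyGet? cell_id_list (-1) with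
  | none => (cell_id_list, all_cells_list)   -- IndexError in Python; excluded by Pre_
  | some cur =>
    let tail := link_chase (linkage_dictionary.length + 1) cur linkage_dictionary
    (cell_id_list ++ tail, all_cells_list ++ tail)

-- ===== PRECONDITION & SPEC =====
-- iterate the linkage map n times from k (staying put once the key is absent)
def linkIter (linkage_dictionary : List (Int × Int)) (k : Int) : Nat → Int
  | 0 => k
  | n + 1 =>
    match (PySem.Dict.mk linkage_dictionary).get? (linkIter linkage_dictionary k n) with
    | some v => v
    | none => linkIter linkage_dictionary k n

-- Pre_ excludes the inputs on which Python A does not return: an empty cell_id_list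
-- (IndexError on cell_id_list[-1]) and a linkage chain from the last element that
-- never leaves the key set (infinite recursion / RecursionError).
def Pre_link_lineages (cell_id_list : List Int) (all_cells_list : List Int)
    (linkage_dictionary : List (Int × Int)) : Prop :=
  cell_id_list ≠ [] ∧
  ∃ n ≤ linkage_dictionary.length,
    (PySem.Dict.mk linkage_dictionary).get?
      (linkIter linkage_dictionary (cell_id_list.getLastD 0) n) = none

instance (cell_id_list : List Int) (all_cells_list : List Int) (linkage_dictionary : List (Int × Int)) : Decidable (Pre_link_lineages cell_id_list all_cells_list linkage_dictionary) := by unfold Pre_link_lineages; infer_instance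

def pvWitness_link_lineages : List Int × List Int × (List (Int × Int)) :=
  ([1], [5, 1], [(1, 2), (2, 3)])

def Spec_link_lineages (cell_id_list : List Int) (all_cells_list : List Int) (linkage_dictionary : List (Int × Int)) (out : List Int × List Int) : Prop := out = link_lineages_alt cell_id_list all_cells_list linkage_dictionary
instance (cell_id_list : List Int) (all_cells_list : List Int) (linkage_dictionary : List (Int × Int)) (out : List Int × List Int) : Decidable (Spec_link_lineages cell_id_list all_cells_list linkage_dictionary out) := by unfold Spec_link_lineages; infer_instance

-- ===== CLAIM (what is proved, stated in full; the proofs are below) =====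
def Claim_equal_link_lineages : Prop := ∀ (cell_id_list : List Int) (all_cells_list : List Int) (linkage_dictionary : List (Int × Int)), Dom_link_lineages cell_id_list all_cells_list linkage_dictionary → Pre_link_lineages cell_id_list all_cells_list linkage_dictionary → Spec_link_lineages cell_id_list all_cells_list linkage_dictionary (link_lineages cell_id_list all_cells_list linkage_dictionary)

-- ===== LEMMAS AND PROOFS =====

-- last element of xs ++ [v] is v, through Python's xs[-1]
lemma pyGet_append_last (xs : List Int) (v : Int) :
    PySem.List.pyGet? (xs ++ [v]) (-1) = some v := by
  simp [PySem.List.pyGet?, PySem.List.pyIdx?]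

-- A's recursion equals "append the chased tail to both lists", for any fuel
lemma link_lineages_rec_eq_chase (fuel : Nat) :
    ∀ (cid acl : List Int) (d : List (Int × Int)) (last : Int),
      PySem.List.pyGet? cid (-1) = some last →
      link_lineages_rec fuel cid acl d =
        (cid ++ link_chase fuel last d, acl ++ link_chase fuel last d) := by
  induction fuel with
  | zero => intro cid acl d last _; simp [link_lineages_rec, link_chase]
  | succ n ih =>
    intro cid acl d last h
    rw [link_lineages_rec, h, link_chase]
    cases hd : (PySem.Dict.mk d).get? last with
    | none => simp only [hd]; simp
    | some v =>
      simp only [hd]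
      rw [ih (cid ++ [v]) (acl ++ [v]) d v (pyGet_append_last cid v)]
      simp

-- ===== VERDICT (by name: the statement is the Claim_ definition above) =====
theorem link_lineages_spec : Claim_equal_link_lineages := by
  intro cid acl d _ _
  unfold Spec_link_lineages link_lineages link_lineages_alt
  cases h : PySem.List.pyGet? cid (-1) with
  | none =>
    rw [link_lineages_rec, h]
  | some last =>
    rw [link_lineages_rec_eq_chase _ cid acl d last h]
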